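-- pv_equiv track=rewrite | github.com/yyspencer/Fire2Scripts | exitsign.py | count_signage_looks
-- ===== SOURCE A (Python) =====
-- def count_signage_looks(rows, look_col):
--     """
--     Count contiguous runs where LookingAt starts with 'Signage' (exact case).
--     Same 'in_look' state machine as your original code.
--     """
--     count = 0
--     in_look = False
--     for r in rows:
--         if len(r) <= look_col:
--             in_look = False
--             continue
--         val = r[look_col]
--         if val is None or val == "":
--             in_look = False
--             continue
--         if isinstance(val, str) and val.startswith("Signage"):
--             if not in_look:
--                 count += 1
--                 in_look = True
--         else:
--             in_look = False
--     return count
-- ===== SOURCE B (Python) =====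
-- def count_signage_looks(rows, look_col):
--     def is_sig(r):
--         if len(r) <= look_col:
--             return False
--         v = r[look_col]
--         return isinstance(v, str) and v.startswith("Signage")
--
--     n = len(rows)
--     i = 0
--     count = 0
--     while i < n:
--         # skip the maximal prefix of non-Signage rows
--         while i < n and not is_sig(rows[i]):
--             i += 1
--         if i < n:
--             # one Signage run starts here: count it and skip it whole
--             count += 1
--             while i < n and is_sig(rows[i]):
--                 i += 1
--     return count
-- ===== Notes on version B (the rewrite author's own statement) =====
-- stated objective: alternative
-- what changed: Replaces A's element-wise in_look state machine with a run-skipping traversal: an outer loop per run that first skips the maximal non-Signage prefix, counts one run, then skips the whole Signage run, with no boolean state variable.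
import Mathlib
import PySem

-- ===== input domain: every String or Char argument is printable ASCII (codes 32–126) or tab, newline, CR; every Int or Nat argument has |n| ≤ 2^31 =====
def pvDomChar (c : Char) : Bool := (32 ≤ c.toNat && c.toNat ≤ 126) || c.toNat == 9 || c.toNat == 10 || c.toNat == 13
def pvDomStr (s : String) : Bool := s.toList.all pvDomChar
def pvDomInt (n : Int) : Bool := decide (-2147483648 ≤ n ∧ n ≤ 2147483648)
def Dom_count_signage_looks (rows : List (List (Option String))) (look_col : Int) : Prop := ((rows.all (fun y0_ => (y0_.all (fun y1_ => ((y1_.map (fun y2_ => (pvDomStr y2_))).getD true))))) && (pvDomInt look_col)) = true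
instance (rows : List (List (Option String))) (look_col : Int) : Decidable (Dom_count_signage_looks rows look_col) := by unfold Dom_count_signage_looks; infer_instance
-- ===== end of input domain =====

-- B replaces A's element-wise in_look state machine by a run-skipping traversal
-- (skip non-Signage prefix, count one run, skip the whole run); alternative decomposition, same cost.

-- ===== PORT A =====
-- one loop iteration of A: state = (count, in_look)
def pvStepA (look_col : Int) (st : Int × Bool) (r : List (Option String)) : Int × Bool :=
  if (r.length : Int) ≤ look_col then (st.1, false)
  else
    match PySem.List.pyGet? r look_col with
    | none => (st.1, false)      -- Python raises IndexError here; excluded by Pre_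
    | some none => (st.1, false)             -- val is None
    | some (some s) =>
        if s = "" then (st.1, false)
        else if PySem.Str.startswith s "Signage" then
          (if st.2 then st else (st.1 + 1, true))
        else (st.1, false)

def count_signage_looks (rows : List (List (Option String))) (look_col : Int) : Int :=
  (rows.foldl (pvStepA look_col) (0, false)).1

-- ===== PORT B =====
-- B's is_sig helper (on the row the index loops look at)
def pvIsSig (look_col : Int) (r : List (Option String)) : Bool :=
  if (r.length : Int) ≤ look_col then false
  else
    match PySem.List.pyGet? r look_col with
    | some (some s) => PySem.Str.startswith s "Signage"
    | _ => false

-- B's outer while loop: each step skips the maximal non-Signage prefix (inner while 1),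
-- counts one run, and skips the whole Signage run (inner while 2); the index loops on a
-- list suffix become dropWhile.
def pvCountRuns (look_col : Int) (rs : List (List (Option String))) : Int :=
  match h : rs.dropWhile (fun r => !pvIsSig look_col r) with
  | [] => 0
  | _ :: t => 1 + pvCountRuns look_col (t.dropWhile (pvIsSig look_col))
termination_by rs.length
decreasing_by
  have h1 : (rs.dropWhile (fun r => !pvIsSig look_col r)).length ≤ rs.length :=
    rs.length_dropWhile_le _
  rw [h] at h1
  have h2 : (t.dropWhile (pvIsSig look_col)).length ≤ t.length := t.length_dropWhile_le _
  simp at h1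
  omega

def count_signage_looks_alt (rows : List (List (Option String))) (look_col : Int) : Int :=
  pvCountRuns look_col rows

-- ===== PRECONDITION & SPEC =====
-- Pre_ excludes exactly the inputs where Python A raises IndexError: a negative look_col
-- wrapping past the start of some row it indexes.
def Pre_count_signage_looks (rows : List (List (Option String))) (look_col : Int) : Prop :=
  0 ≤ look_col ∨ ∀ r ∈ rows, -(r.length : Int) ≤ look_col
instance (rows : List (List (Option String))) (look_col : Int) : Decidable (Pre_count_signage_looks rows look_col) := by unfold Pre_count_signage_looks; infer_instance

def pvWitness_count_signage_looks : List (List (Option String)) × Int :=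
  ([[some "Signage A"], [], [some "x"], [some "Signage"]], 0)

def Spec_count_signage_looks (rows : List (List (Option String))) (look_col : Int) (out : Int) : Prop := out = count_signage_looks_alt rows look_col
instance (rows : List (List (Option String))) (look_col : Int) (out : Int) : Decidable (Spec_count_signage_looks rows look_col out) := by unfold Spec_count_signage_looks; infer_instance

-- ===== CLAIM (what is proved, stated in full; the proofs are below) =====
def Claim_equal_count_signage_looks : Prop := ∀ (rows : List (List (Option String))) (look_col : Int), Dom_count_signage_looks rows look_col → Pre_count_signage_looks rows look_col → Spec_count_signage_looks rows look_col (count_signage_looks rows look_col)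

-- ===== LEMMAS AND PROOFS =====

-- A's step: count increments iff the row is a rising edge of B's predicate; in_look becomes the predicate
lemma stepA_eq (look_col : Int) (st : Int × Bool) (r : List (Option String)) :
    pvStepA look_col st r =
      ((if pvIsSig look_col r && !st.2 then st.1 + 1 else st.1), pvIsSig look_col r) := by
  unfold pvStepA pvIsSig
  by_cases h : (r.length : Int) ≤ look_col
  · simp [h]
  · simp only [if_neg h]
    rcases hv : PySem.List.pyGet? r look_col with _ | (_ | s)
    · simp
    · simp
    · by_cases hs : s = ""
      · subst hs
        have hz : PySem.Chars.startswith ([] : List Char) ['S','i','g','n','a','g','e'] = false := by decide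
        simp [hz]
      · simp only [if_neg hs]
        by_cases hw : PySem.Str.startswith s "Signage" = true
        · simp only [hw, if_true, Bool.true_and]
          cases hb : st.2
          · simp
          · simp [Prod.ext_iff, hb]
        · simp only [Bool.eq_false_iff.mpr hw, Bool.false_and]
          simp

-- unfolding pvCountRuns across a non-Signage head row
lemma countRuns_cons_neg (look_col : Int) (r : List (Option String))
    (t : List (List (Option String))) (hr : pvIsSig look_col r = false) :
    pvCountRuns look_col (r :: t) = pvCountRuns look_col t := by
  rw [pvCountRuns.eq_def (rs := r :: t)]
  rw [show (r :: t).dropWhile (fun r => !pvIsSig look_col r)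
        = t.dropWhile (fun r => !pvIsSig look_col r) from by simp [hr]]
  rw [pvCountRuns.eq_def (rs := t)]

-- unfolding pvCountRuns across a Signage head row
lemma countRuns_cons_pos (look_col : Int) (r : List (Option String))
    (t : List (List (Option String))) (hr : pvIsSig look_col r = true) :
    pvCountRuns look_col (r :: t) = 1 + pvCountRuns look_col (t.dropWhile (pvIsSig look_col)) := by
  rw [pvCountRuns.eq_def]
  rw [show (r :: t).dropWhile (fun r => !pvIsSig look_col r) = r :: t from by simp [hr]]

-- main invariant: A's fold from (c, p) equals c plus B's run count of the remaining rows,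
-- where p = true means the current Signage run (if any) has already been counted
lemma fold_eq (look_col : Int) (rows : List (List (Option String))) :
    ∀ (c : Int),
      ((rows.foldl (pvStepA look_col) (c, false)).1 = c + pvCountRuns look_col rows ∧
       (rows.foldl (pvStepA look_col) (c, true)).1 =
         c + pvCountRuns look_col (rows.dropWhile (pvIsSig look_col))) := by
  induction rows with
  | nil =>
    intro c
    constructor <;> simp [pvCountRuns]
  | cons r t ih =>
    intro c
    by_cases hr : pvIsSig look_col r = true
    · constructor
      · simp only [List.foldl_cons, stepA_eq, hr]
        norm_num
        rw [(ih (c + 1)).2, countRuns_cons_pos look_col r t hr]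
        ring
      · simp only [List.foldl_cons, stepA_eq, hr]
        norm_num
        rw [(ih c).2, List.dropWhile_cons, hr]
        simp
    · have hr' : pvIsSig look_col r = false := by simpa using hr
      constructor
      · simp only [List.foldl_cons, stepA_eq, hr']
        norm_num
        rw [(ih c).1, countRuns_cons_neg look_col r t hr']
      · simp only [List.foldl_cons, stepA_eq, hr']
        norm_num
        rw [(ih c).1, List.dropWhile_cons, hr']
        simp [countRuns_cons_neg look_col r t hr']

-- ===== VERDICT (by name: the statement is the Claim_ definition above) =====
theorem count_signage_looks_spec : Claim_equal_count_signage_looks := by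
  intro rows look_col _ _
  unfold Spec_count_signage_looks count_signage_looks count_signage_looks_alt
  have := (fold_eq look_col rows 0).1
  simpa using this
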